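-- pv_equiv track=rewrite | github.com/BAMDH/Cosas_Uni | Intro programación/Prácticas/Resueltos/Determinar sin un número tiene ceros (recursividad simple).py | ceros
-- ===== SOURCE A (Python) =====
-- def ceros(cantidad):
--     if cantidad==0:
--         return True
--     else:
--         digito=cantidad%10
--         if digito==0:
--             return True
--         else:
--             nueva_cantidad= cantidad//10
--             if nueva_cantidad==0:
--                 return False
--             else:
--                 return ceros(nueva_cantidad)
-- ===== SOURCE B (Python) =====
-- def ceros(cantidad):
--     while abs(cantidad) >= 10:
--         if cantidad % 10 == 0:
--             return True
--         cantidad //= 10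
--     return cantidad == 0
-- ===== Notes on version B (the rewrite author's own statement) =====
-- stated objective: simpler
-- what changed: Replaces A's recursion with its three-way branch chain by a short total while-loop that strips digits while at least two remain, folding the zero case into the final arithmetic comparison.
import Mathlib
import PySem

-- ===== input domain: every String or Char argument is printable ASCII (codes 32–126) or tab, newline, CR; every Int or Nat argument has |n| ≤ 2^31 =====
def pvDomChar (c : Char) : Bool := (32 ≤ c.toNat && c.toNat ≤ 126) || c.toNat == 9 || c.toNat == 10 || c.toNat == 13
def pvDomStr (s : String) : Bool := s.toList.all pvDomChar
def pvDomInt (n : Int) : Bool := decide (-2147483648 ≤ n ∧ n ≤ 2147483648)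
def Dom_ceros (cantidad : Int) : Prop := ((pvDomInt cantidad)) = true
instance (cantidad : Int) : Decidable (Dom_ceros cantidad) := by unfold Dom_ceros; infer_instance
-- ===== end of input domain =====

-- B replaces A's recursion and three-way branch chain by a total while-loop that strips digits
-- while at least two remain, folding the zero case into the final arithmetic return.


-- ===== PORT A =====
-- A's recursion does not terminate on some negative inputs (Python ends in RecursionError there;
-- Pre_ceros excludes exactly those), so the port carries a fuel parameter that is ample on every
-- admitted input; each branch is A's, in A's order.
def cerosFuel : Nat → Int → Bool
  | 0, _ => false
  | fuel + 1, cantidad =>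
    if cantidad = 0 then true
    else
      let digito := PySem.Int.mod cantidad 10
      if digito = 0 then true
      else
        let nueva_cantidad := PySem.Int.floordiv cantidad 10
        if nueva_cantidad = 0 then false
        else cerosFuel fuel nueva_cantidad

def ceros (cantidad : Int) : Bool := cerosFuel (cantidad.natAbs + 1) cantidad

-- ===== PORT B =====
-- the while-loop of Source B: it runs while abs(cantidad) >= 10, so it terminates on every input
-- (|cantidad // 10| < |cantidad| there) and needs no fuel
lemma natAbs_floordiv_ten_lt (c : Int) (h : 10 ≤ c.natAbs) :
    (PySem.Int.floordiv c 10).natAbs < c.natAbs := by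
  rw [PySem.Int.floordiv_eq_ediv_of_pos (by omega)]
  omega

def ceros_alt (cantidad : Int) : Bool :=
  if h : 10 ≤ cantidad.natAbs then
    if PySem.Int.mod cantidad 10 = 0 then true
    else ceros_alt (PySem.Int.floordiv cantidad 10)
  else decide (cantidad = 0)
termination_by cantidad.natAbs
decreasing_by exact natAbs_floordiv_ten_lt _ h

-- ===== PRECONDITION & SPEC =====
-- Pre_ excludes exactly the inputs on which Python A never returns (it recurses until
-- RecursionError): A returns on a negative cantidad iff some digit of its floor-division chain
-- is 0, and any such digit position k necessarily satisfies 10^k ≤ |cantidad|, i.e.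
-- k ≤ log10 |cantidad| — no input on which A returns a value is excluded.
def Pre_ceros (cantidad : Int) : Prop :=
  0 ≤ cantidad ∨
    ∃ k ≤ Nat.log 10 cantidad.natAbs,
      PySem.Int.mod (PySem.Int.floordiv cantidad (10 ^ k)) 10 = 0
instance (cantidad : Int) : Decidable (Pre_ceros cantidad) := by unfold Pre_ceros; infer_instance
def pvWitness_ceros : Int := (105)

def Spec_ceros (cantidad : Int) (out : Bool) : Prop := out = ceros_alt cantidad
instance (cantidad : Int) (out : Bool) : Decidable (Spec_ceros cantidad out) := by
  unfold Spec_ceros; infer_instance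

-- ===== CLAIM =====
def Claim_equal_ceros : Prop :=
  ∀ (cantidad : Int), Dom_ceros cantidad → Pre_ceros cantidad →
    Spec_ceros cantidad (ceros cantidad)

-- ===== LEMMAS AND PROOFS =====

-- a zero floor-division digit of a negative number forces 10^k ≤ |cantidad| (the quotient at
-- that position is ≤ -10), hence its position is at most log10 |cantidad|
lemma witness_le_log (c : Int) (hc : c < 0) (k : Nat)
    (hk : PySem.Int.mod (PySem.Int.floordiv c (10 ^ k)) 10 = 0) :
    k ≤ Nat.log 10 c.natAbs := by
  have hp : (0:Int) < 10 ^ k := by positivity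
  rw [PySem.Int.floordiv_eq_ediv_of_pos hp] at hk
  have hdvd : (10:Int) ∣ c / 10 ^ k := (PySem.Int.mod_eq_zero_iff_dvd _ _).1 hk
  have hneg : c / 10 ^ k < 0 := Int.ediv_neg_of_neg_of_pos hc hp
  have h10 : c / 10 ^ k ≤ -10 := by rcases hdvd with ⟨t, ht⟩; omega
  have hltq : c < (c / 10 ^ k + 1) * 10 ^ k := Int.lt_ediv_add_one_mul_self c hp
  have hbound : (10:Int) ^ k ≤ -c := by nlinarith
  have hcast : (((10 ^ k : Nat)) : Int) = (10:Int) ^ k := by push_cast; rfl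
  have hnat : 10 ^ k ≤ c.natAbs := by omega
  exact (Nat.le_log_iff_pow_le (by norm_num) (by omega)).mpr hnat

-- Pre_ is preserved by one division step when the current digit is nonzero
lemma pre_step (c : Int) (hm : PySem.Int.mod c 10 ≠ 0) (h : Pre_ceros c) :
    Pre_ceros (PySem.Int.floordiv c 10) := by
  by_cases hc : 0 ≤ c
  · left
    rw [PySem.Int.floordiv_eq_ediv_of_pos (by norm_num)]
    exact Int.ediv_nonneg hc (by norm_num)
  · push_neg at hc
    rcases h with h0 | ⟨k, _, hmod⟩
    · omega
    · cases k with
      | zero =>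
        rw [pow_zero, PySem.Int.floordiv_eq_ediv_of_pos one_pos, Int.ediv_one] at hmod
        exact absurd hmod hm
      | succ j =>
        have hmod' : PySem.Int.mod (PySem.Int.floordiv (PySem.Int.floordiv c 10) (10 ^ j)) 10 = 0 := by
          rw [PySem.Int.floordiv_eq_ediv_of_pos (show (0:Int) < 10 by norm_num),
              PySem.Int.floordiv_eq_ediv_of_pos (by positivity),
              Int.ediv_ediv_of_nonneg (by norm_num)]
          rw [PySem.Int.floordiv_eq_ediv_of_pos (by positivity)] at hmod
          convert hmod using 3
          ring
        have hcneg : PySem.Int.floordiv c 10 < 0 := by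
          rw [PySem.Int.floordiv_eq_ediv_of_pos (by norm_num)]
          exact Int.ediv_neg_of_neg_of_pos hc (by norm_num)
        exact Or.inr ⟨j, witness_le_log _ hcneg j hmod', hmod'⟩

-- with ample fuel, A's recursion computes B's loop on every admitted input
lemma cerosFuel_eq_alt (n : Nat) : ∀ c : Int, c.natAbs < n → Pre_ceros c →
    cerosFuel n c = ceros_alt c := by
  induction n with
  | zero => intro c h _; omega
  | succ m ih =>
    intro c hlt hpre
    simp only [cerosFuel]
    by_cases h0 : c = 0
    · subst h0
      rw [ceros_alt]
      norm_num
    rw [if_neg h0]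
    by_cases hm : PySem.Int.mod c 10 = 0
    · rw [if_pos hm, ceros_alt]
      have h10 : 10 ≤ c.natAbs := by
        rcases (PySem.Int.mod_eq_zero_iff_dvd c 10).1 hm with ⟨t, ht⟩
        omega
      rw [dif_pos h10, if_pos hm]
    rw [if_neg hm]
    have hfd : PySem.Int.floordiv c 10 = c / 10 :=
      PySem.Int.floordiv_eq_ediv_of_pos (by norm_num)
    have h10 : PySem.Int.floordiv c 10 ≠ 0 → 10 ≤ c.natAbs := by
      intro hq
      rw [hfd] at hq
      rcases Int.lt_or_lt_of_ne h0 with hneg | hpos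
      · by_contra hsmall
        rcases hpre with hge | ⟨k, hk, hmod⟩
        · omega
        · have hlog : Nat.log 10 c.natAbs = 0 := Nat.log_of_lt (by omega)
          rw [hlog, Nat.le_zero] at hk
          subst hk
          rw [pow_zero, PySem.Int.floordiv_eq_ediv_of_pos one_pos, Int.ediv_one] at hmod
          exact hm hmod
      · omega
    by_cases hq : PySem.Int.floordiv c 10 = 0
    · rw [if_pos hq, ceros_alt]
      have hpos : 0 < c := by rw [hfd] at hq; omega
      rw [dif_neg (by rw [hfd] at hq; omega)]
      simp [h0]
    · rw [if_neg hq, ceros_alt, dif_pos (h10 hq), if_neg hm]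
      have hdec := natAbs_floordiv_ten_lt c (h10 hq)
      exact ih _ (by omega) (pre_step c hm hpre)

-- ===== VERDICT =====
theorem ceros_spec : Claim_equal_ceros := by
  intro c _ hp
  unfold Spec_ceros ceros
  exact cerosFuel_eq_alt _ c (by omega) hp
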